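-- pv_equiv track=rewrite | github.com/yingnengd/Moonbeam-MIDI-Continue | recipes/inference/custom_music_generation/full_song/engine/pitch_constraints.py | snap_to_nearest_pc
-- ===== SOURCE A (Python) =====
-- def snap_to_nearest_pc(pitch, allowed_pcs):
--     """
--     将 pitch 吸附到最近的合法音级，尽量保持旋律方向
--     """
--     base_octave = (pitch // 12) * 12
--     candidates = []
--
--     for pc in allowed_pcs:
--         for shift in (-12, 0, 12):
--             candidates.append(base_octave + pc + shift)
--
--     # 优先：距离最小，其次：不上跳
--     candidates.sort(key=lambda x: (abs(x - pitch), x < pitch))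
--     return candidates[0]
-- ===== SOURCE B (Python) =====
-- def snap_to_nearest_pc(pitch, allowed_pcs):
--     """
--     将 pitch 吸附到最近的合法音级，尽量保持旋律方向
--     """
--     base_octave = (pitch // 12) * 12
--     best = None
--     best_key = None
--     for pc in allowed_pcs:
--         for shift in (-12, 0, 12):
--             cand = base_octave + pc + shift
--             key = (abs(cand - pitch), cand < pitch)
--             if best is None or key < best_key:
--                 best, best_key = cand, key
--     return best
-- ===== Notes on version B (the rewrite author's own statement) =====
-- stated objective: faster
-- what changed: Instead of materialising all 3n candidates into a list and stably sorting it by (distance, upward) before taking the head, B keeps a single running-best candidate in one pass, replacing it only on a strictly smaller key so the earliest candidate wins ties exactly like the stable sort.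
import Mathlib
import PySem

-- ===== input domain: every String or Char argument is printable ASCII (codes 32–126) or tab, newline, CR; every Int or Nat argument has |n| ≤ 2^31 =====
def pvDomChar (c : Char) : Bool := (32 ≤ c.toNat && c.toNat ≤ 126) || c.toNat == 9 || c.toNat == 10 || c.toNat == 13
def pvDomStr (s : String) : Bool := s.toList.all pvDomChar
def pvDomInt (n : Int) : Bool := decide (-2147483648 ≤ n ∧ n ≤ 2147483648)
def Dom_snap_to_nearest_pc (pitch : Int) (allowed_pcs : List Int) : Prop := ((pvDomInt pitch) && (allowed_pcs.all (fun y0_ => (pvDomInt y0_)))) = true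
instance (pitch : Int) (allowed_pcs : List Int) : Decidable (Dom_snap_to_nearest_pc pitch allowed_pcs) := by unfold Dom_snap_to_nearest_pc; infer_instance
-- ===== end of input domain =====

-- B replaces the build-all-candidates-then-stable-sort of A with a single running-best pass
-- (strict '<' on the same (distance, upward) key, so the earliest candidate wins ties like the stable sort).

-- ===== PORT A =====
def snap_to_nearest_pc (pitch : Int) (allowed_pcs : List Int) : Int :=
  let base_octave := PySem.Int.floordiv pitch 12 * 12
  let candidates := allowed_pcs.foldl
    (fun acc pc => [(-12 : Int), 0, 12].foldl (fun acc2 shift => acc2 ++ [base_octave + pc + shift]) acc) []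
  let srt := PySem.List.sorted2 candidates (fun x => |x - pitch|) (fun x => decide (x < pitch))
  (PySem.List.pyGet? srt 0).getD 0   -- candidates[0]; Pre_ excludes the empty case (IndexError)

-- ===== PORT B =====
def snapStep (pitch : Int) (st : Option (Int × (Int × Bool))) (cand : Int) : Option (Int × (Int × Bool)) :=
  let k : Int × Bool := (|cand - pitch|, decide (cand < pitch))
  match st with
  | none => some (cand, k)
  | some (b, bk) =>
      if k.1 < bk.1 ∨ (k.1 = bk.1 ∧ k.2 = false ∧ bk.2 = true) then some (cand, k) else some (b, bk)

def snap_to_nearest_pc_alt (pitch : Int) (allowed_pcs : List Int) : Int :=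
  let base_octave := PySem.Int.floordiv pitch 12 * 12
  let res := allowed_pcs.foldl
    (fun st pc => [(-12 : Int), 0, 12].foldl (fun st2 shift => snapStep pitch st2 (base_octave + pc + shift)) st) none
  match res with
  | some (b, _) => b
  | none => 0   -- unreachable under Pre_ (Source B returns None there)

-- ===== PRECONDITION & SPEC =====
-- Pre_ excludes the empty allowed_pcs list, on which A raises IndexError (candidates[0]).
def Pre_snap_to_nearest_pc (pitch : Int) (allowed_pcs : List Int) : Prop := allowed_pcs ≠ []
instance (pitch : Int) (allowed_pcs : List Int) : Decidable (Pre_snap_to_nearest_pc pitch allowed_pcs) := by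
  unfold Pre_snap_to_nearest_pc; infer_instance

def pvWitness_snap_to_nearest_pc : Int × List Int := (61, [0, 4, 7])

def Spec_snap_to_nearest_pc (pitch : Int) (allowed_pcs : List Int) (out : Int) : Prop :=
  out = snap_to_nearest_pc_alt pitch allowed_pcs
instance (pitch : Int) (allowed_pcs : List Int) (out : Int) : Decidable (Spec_snap_to_nearest_pc pitch allowed_pcs out) := by
  unfold Spec_snap_to_nearest_pc; infer_instance

-- ===== CLAIM (what is proved, stated in full; the proofs are below) =====
def Claim_equal_snap_to_nearest_pc : Prop := ∀ (pitch : Int) (allowed_pcs : List Int), Dom_snap_to_nearest_pc pitch allowed_pcs → Pre_snap_to_nearest_pc pitch allowed_pcs → Spec_snap_to_nearest_pc pitch allowed_pcs (snap_to_nearest_pc pitch allowed_pcs)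

-- ===== LEMMAS AND PROOFS =====

-- the strict comparator sorted2 sorts by, specialised to our key
def snapLt (pitch : Int) (a b : Int) : Bool :=
  decide (|a - pitch| < |b - pitch|) ||
    (!decide (|b - pitch| < |a - pitch|) && decide (decide (a < pitch) < decide (b < pitch)))

-- B's replace-condition coincides with the sort comparator
lemma snapLt_iff (pitch a b : Int) :
    ((|a - pitch| < |b - pitch|) ∨
      (|a - pitch| = |b - pitch| ∧ decide (a < pitch) = false ∧ decide (b < pitch) = true))
      ↔ snapLt pitch a b = true := by
  unfold snapLt
  by_cases h1 : a < pitch <;> by_cases h2 : b < pitch <;>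
    simp [h1, h2, Bool.lt_iff] <;> omega

-- head of an insertBy step depends only on the old head
lemma head?_insertBy (before : Int → Int → Bool) (x : Int) (acc : List Int) :
    (PySem.List.insertBy before x acc).head? =
      (match acc.head? with
       | none => some x
       | some y => if before x y then some x else some y) := by
  cases acc with
  | nil => simp [PySem.List.insertBy]
  | cons y ys => by_cases h : before x y <;> simp [PySem.List.insertBy, h]

-- head of the insertion-sort fold is the running strict-min fold
lemma head?_foldl_insertBy (before : Int → Int → Bool) :
    ∀ (cs : List Int) (acc : List Int),
      (cs.foldl (fun a x => PySem.List.insertBy before x a) acc).head? =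
        cs.foldl (fun st c =>
          match st with
          | none => some c
          | some b => if before c b then some c else some b) acc.head? := by
  intro cs
  induction cs with
  | nil => intro acc; rfl
  | cons c cs ih =>
    intro acc
    rw [List.foldl_cons, List.foldl_cons, ih]
    rw [head?_insertBy]

-- B's pair-carrying fold projects to the plain strict-min fold
lemma snapStep_fold_fst (pitch : Int) :
    ∀ (cs : List Int) (o : Option Int),
      cs.foldl (snapStep pitch) (o.map (fun b => (b, (|b - pitch|, decide (b < pitch))))) =
        (cs.foldl (fun st c =>
          match st with
          | none => some c
          | some b => if snapLt pitch c b then some c else some b) o).map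
          (fun b => (b, (|b - pitch|, decide (b < pitch)))) := by
  intro cs
  induction cs with
  | nil => intro o; rfl
  | cons c cs ih =>
    intro o
    rw [List.foldl_cons, List.foldl_cons]
    cases o with
    | none => exact ih (some c)
    | some b =>
      by_cases h : snapLt pitch c b
      · have hc : (|c - pitch| < |b - pitch|) ∨
            (|c - pitch| = |b - pitch| ∧ decide (c < pitch) = false ∧ decide (b < pitch) = true) :=
          (snapLt_iff pitch c b).mpr h
        simp only [Option.map_some, snapStep, h, if_pos hc, if_pos h]
        exact ih (some c)
      · have hc : ¬((|c - pitch| < |b - pitch|) ∨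
            (|c - pitch| = |b - pitch| ∧ decide (c < pitch) = false ∧ decide (b < pitch) = true)) := by
          intro hcon; exact h ((snapLt_iff pitch c b).mp hcon)
        simp only [Option.map_some, snapStep, if_neg hc, if_neg h]
        exact ih (some b)

-- the strict-min fold never loses a some accumulator
lemma min_fold_isSome (before : Int → Int → Bool) :
    ∀ (cs : List Int) (b : Int),
      ∃ r, cs.foldl (fun st c =>
          match st with
          | none => some c
          | some b => if before c b then some c else some b) (some b) = some r := by
  intro cs
  induction cs with
  | nil => intro b; exact ⟨b, rfl⟩
  | cons c cs ih =>
    intro b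
    rw [List.foldl_cons]
    by_cases h : before c b <;> simp only [h, if_true, if_false, ite_true, ite_false] <;>
      first | exact ih c | exact ih b

-- A's candidate-building fold is append of the flatMap
lemma candidates_eq (base : Int) :
    ∀ (l : List Int) (acc : List Int),
      l.foldl (fun acc pc => [(-12 : Int), 0, 12].foldl (fun acc2 shift => acc2 ++ [base + pc + shift]) acc) acc =
        acc ++ l.flatMap (fun pc => [base + pc + -12, base + pc + 0, base + pc + 12]) := by
  intro l
  induction l with
  | nil => intro acc; simp
  | cons pc l ih => intro acc; rw [List.foldl_cons]; rw [ih]; simp [List.foldl]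

-- B's nested fold is the fold over the flattened candidate list
lemma alt_fold_flat (pitch base : Int) :
    ∀ (l : List Int) (st : Option (Int × (Int × Bool))),
      l.foldl (fun st pc => [(-12 : Int), 0, 12].foldl (fun st2 shift => snapStep pitch st2 (base + pc + shift)) st) st =
        (l.flatMap (fun pc => [base + pc + -12, base + pc + 0, base + pc + 12])).foldl (snapStep pitch) st := by
  intro l
  induction l with
  | nil => intro st; rfl
  | cons pc l ih => intro st; rw [List.foldl_cons]; rw [ih]; simp [List.foldl]

lemma sorted2_unfold (pitch : Int) (cs : List Int) :
    PySem.List.sorted2 cs (fun x => |x - pitch|) (fun x => decide (x < pitch)) =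
      cs.foldl (fun a x => PySem.List.insertBy (snapLt pitch) x a) [] := rfl

-- ===== VERDICT (by name: the statement is the Claim_ definition above) =====
theorem snap_to_nearest_pc_spec : Claim_equal_snap_to_nearest_pc := by
  intro pitch allowed_pcs _ hpre
  unfold Spec_snap_to_nearest_pc snap_to_nearest_pc snap_to_nearest_pc_alt
  simp only []
  set base := PySem.Int.floordiv pitch 12 * 12 with hbase
  rw [candidates_eq base allowed_pcs [], alt_fold_flat pitch base allowed_pcs none]
  set cs := allowed_pcs.flatMap (fun pc => [base + pc + -12, base + pc + 0, base + pc + 12]) with hcs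
  rw [List.nil_append]
  rw [sorted2_unfold]
  -- the flattened candidate list is nonempty
  obtain ⟨pc0, rest, hl⟩ : ∃ pc0 rest, allowed_pcs = pc0 :: rest := by
    cases allowed_pcs with
    | nil => exact absurd rfl hpre
    | cons a t => exact ⟨a, t, rfl⟩
  have hcs' : cs = (base + pc0 + -12) :: ((base + pc0 + 0) :: (base + pc0 + 12) ::
      rest.flatMap (fun pc => [base + pc + -12, base + pc + 0, base + pc + 12])) := by
    rw [hcs, hl]; rfl
  -- both sides are the strict-min fold over cs
  have hB := snapStep_fold_fst pitch cs none
  simp only [Option.map_none] at hB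
  have hA := head?_foldl_insertBy (snapLt pitch) cs []
  simp only [List.head?_nil] at hA
  rw [hcs'] at hA hB ⊢
  obtain ⟨r, hr⟩ := min_fold_isSome (snapLt pitch)
    ((base + pc0 + 0) :: (base + pc0 + 12) :: rest.flatMap (fun pc => [base + pc + -12, base + pc + 0, base + pc + 12]))
    (base + pc0 + -12)
  have hmin : List.foldl (fun st c => match st with
        | none => some c
        | some b => if snapLt pitch c b then some c else some b) none
      ((base + pc0 + -12) :: ((base + pc0 + 0) :: (base + pc0 + 12) ::
        rest.flatMap (fun pc => [base + pc + -12, base + pc + 0, base + pc + 12]))) = some r := by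
    rw [List.foldl_cons]; exact hr
  rw [hmin] at hA hB
  rw [hB]
  simp only [Option.map_some]
  cases hsrt : List.foldl (fun a x => PySem.List.insertBy (snapLt pitch) x a) []
      ((base + pc0 + -12) :: ((base + pc0 + 0) :: (base + pc0 + 12) ::
        rest.flatMap (fun pc => [base + pc + -12, base + pc + 0, base + pc + 12]))) with
  | nil => rw [hsrt] at hA; simp at hA
  | cons h t =>
    rw [hsrt] at hA
    simp only [List.head?_cons, Option.some.injEq] at hA
    simp [PySem.List.pyGet?, PySem.List.pyIdx?, hA]
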